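-- pv_equiv track=rewrite | github.com/leszaj/scripts | python/codility/get_max_sequence_of_same_number_of_repetitions.py | solution
-- ===== SOURCE A (Python) =====
-- def solution(X, Y, A):
--     # write your code in Python 3.6
--     N = len(A)
--     result = -1
--     nX = 0
--     nY = 0
--
--     for i in range(N):
--         if A[i] == X:
--             nX += 1
--         elif A[i] == Y:
--             nY += 1
--         if (0 != nX) and (nX == nY):
--             result = i
--
--     return result
-- ===== SOURCE B (Python) =====
-- def solution(X, Y, A):
--     # Count totals once (same if/elif rule as the forward scan would apply).
--     cntX = 0
--     cntY = 0
--     for a in A: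
--         if a == X:
--             cntX += 1
--         elif a == Y:
--             cntY += 1
--     # Scan backward; the first index found is the last matching one.
--     i = len(A) - 1
--     for a in reversed(A):
--         if cntX == cntY and cntX != 0:
--             return i
--         if a == X:
--             cntX -= 1
--         elif a == Y:
--             cntY -= 1
--         i -= 1
--     return -1
-- ===== Notes on version B (the rewrite author's own statement) =====
-- stated objective: alternative
-- what changed: B precomputes the total X/Y counts in one pass, then scans backward decrementing counts and returns at the first (i.e. last) index whose inclusive-prefix counts are equal and nonzero, instead of A's single forward pass that keeps overwriting the result.
import Mathlib
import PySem

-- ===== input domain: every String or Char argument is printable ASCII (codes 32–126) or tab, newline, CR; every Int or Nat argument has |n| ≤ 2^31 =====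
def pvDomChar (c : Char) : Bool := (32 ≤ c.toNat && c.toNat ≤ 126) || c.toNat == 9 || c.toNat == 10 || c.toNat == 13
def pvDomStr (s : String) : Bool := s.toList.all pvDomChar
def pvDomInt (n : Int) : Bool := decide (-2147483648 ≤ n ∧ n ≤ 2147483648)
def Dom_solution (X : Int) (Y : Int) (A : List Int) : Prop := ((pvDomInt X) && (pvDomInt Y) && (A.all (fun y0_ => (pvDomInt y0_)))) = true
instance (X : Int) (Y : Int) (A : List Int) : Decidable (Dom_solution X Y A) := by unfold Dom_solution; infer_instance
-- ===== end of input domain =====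

-- B replaces A's forward last-match scan by a total-count pass plus a backward early-exit scan; same O(n) cost, different traversal.

-- ===== PORT A =====
-- state: (i, result, nX, nY)
def stepA (X Y : Int) (s : Int × Int × Int × Int) (a : Int) : Int × Int × Int × Int :=
  let (i, result, nX, nY) := s
  let (nX, nY) := if a = X then (nX + 1, nY) else if a = Y then (nX, nY + 1) else (nX, nY)
  let result := if nX ≠ 0 ∧ nX = nY then i else result
  (i + 1, result, nX, nY)

def solution (X : Int) (Y : Int) (A : List Int) : Int :=
  (A.foldl (stepA X Y) (0, -1, 0, 0)).2.1

-- ===== PORT B =====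
-- one counting step of B's first loop (same if/elif rule)
def stepB (X Y : Int) (c : Int × Int) (a : Int) : Int × Int :=
  if a = X then (c.1 + 1, c.2) else if a = Y then (c.1, c.2 + 1) else c

-- B's backward loop over the reversed list: index i, current inclusive-prefix counts
def bloop (X Y : Int) : List Int → Int → Int → Int → Int
  | [], _, _, _ => -1
  | a :: rest, i, cX, cY =>
    if cX = cY ∧ cX ≠ 0 then i
    else if a = X then bloop X Y rest (i - 1) (cX - 1) cY
    else if a = Y then bloop X Y rest (i - 1) cX (cY - 1)
    else bloop X Y rest (i - 1) cX cY

def solution_alt (X : Int) (Y : Int) (A : List Int) : Int :=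
  let c := A.foldl (stepB X Y) (0, 0)
  bloop X Y A.reverse ((A.length : Int) - 1) c.1 c.2

-- ===== PRECONDITION & SPEC =====
def Spec_solution (X : Int) (Y : Int) (A : List Int) (out : Int) : Prop := out = solution_alt X Y A
instance (X : Int) (Y : Int) (A : List Int) (out : Int) : Decidable (Spec_solution X Y A out) := by unfold Spec_solution; infer_instance

-- ===== CLAIM (what is proved, stated in full; the proofs are below) =====
def Claim_equal_solution : Prop := ∀ (X : Int) (Y : Int) (A : List Int), Dom_solution X Y A → Spec_solution X Y A (solution X Y A)

-- ===== LEMMAS AND PROOFS =====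

-- component characterization of A's fold state: index and counts
theorem afold_index (X Y : Int) (l : List Int) :
    ∀ (i r x y : Int), (l.foldl (stepA X Y) (i, r, x, y)).1 = i + l.length := by
  induction l with
  | nil => intro i r x y; simp
  | cons a t ih =>
    intro i r x y
    simp only [List.foldl_cons, stepA]
    split_ifs <;> simp [ih] <;> ring

theorem afold_counts (X Y : Int) (l : List Int) :
    ∀ (i r x y : Int), (l.foldl (stepA X Y) (i, r, x, y)).2.2 = l.foldl (stepB X Y) (x, y) := by
  induction l with
  | nil => intro i r x y; simp
  | cons a t ih =>
    intro i r x y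
    simp only [List.foldl_cons, stepA, stepB]
    split_ifs <;> simp [ih]

theorem main_lemma (X Y : Int) (l : List Int) :
    ∀ (i r x y : Int), 0 ≤ i →
      (l.foldl (stepA X Y) (i, r, x, y)).2.1 =
        (if bloop X Y l.reverse (i + l.length - 1)
              (l.foldl (stepB X Y) (x, y)).1 (l.foldl (stepB X Y) (x, y)).2 = -1
         then r
         else bloop X Y l.reverse (i + l.length - 1)
              (l.foldl (stepB X Y) (x, y)).1 (l.foldl (stepB X Y) (x, y)).2) := by
  induction l using List.reverseRecOn with
  | nil => intro i r x y hi; simp [bloop]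
  | append_singleton t a ih =>
    intro i r x y hi
    have hidx := afold_index X Y t i r x y
    have hcnt := afold_counts X Y t i r x y
    rcases h : t.foldl (stepA X Y) (i, r, x, y) with ⟨si, sr, sx, sy⟩
    rw [h] at hidx hcnt
    simp only [List.foldl_append, List.foldl_cons, List.foldl_nil, List.reverse_append,
      List.reverse_cons, List.reverse_nil, List.nil_append, List.singleton_append,
      List.length_append, List.length_cons, List.length_nil, Nat.zero_add,
      Nat.cast_add, Nat.cast_one, h]
    have hsx : sx = (t.foldl (stepB X Y) (x, y)).1 := by rw [← hcnt]
    have hsy : sy = (t.foldl (stepB X Y) (x, y)).2 := by rw [← hcnt]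
    have e0 : i + ((t.length : Int) + 1) - 1 = i + t.length := by ring
    rw [e0]
    have hne : i + (t.length : Int) ≠ -1 := by omega
    simp only [stepA, stepB, bloop]
    by_cases hX : a = X
    · simp only [if_pos hX]
      by_cases hc : sx + 1 ≠ 0 ∧ sx + 1 = sy
      · have hc' : (t.foldl (stepB X Y) (x, y)).1 + 1 = (t.foldl (stepB X Y) (x, y)).2 ∧
            (t.foldl (stepB X Y) (x, y)).1 + 1 ≠ 0 := by rw [← hsx, ← hsy]; tauto
        simp only [if_pos hc, if_pos hc', if_neg hne]; exact hidx
      · have hc' : ¬ ((t.foldl (stepB X Y) (x, y)).1 + 1 = (t.foldl (stepB X Y) (x, y)).2 ∧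
            (t.foldl (stepB X Y) (x, y)).1 + 1 ≠ 0) := by rw [← hsx, ← hsy]; tauto
        simp only [if_neg hc, if_neg hc']
        have e1 : (t.foldl (stepB X Y) (x, y)).1 + 1 - 1 = (t.foldl (stepB X Y) (x, y)).1 := by ring
        rw [e1, ← ih i r x y hi, h]
    · simp only [if_neg hX]
      by_cases hY : a = Y
      · simp only [if_pos hY]
        by_cases hc : sx ≠ 0 ∧ sx = sy + 1
        · have hc' : (t.foldl (stepB X Y) (x, y)).1 = (t.foldl (stepB X Y) (x, y)).2 + 1 ∧
              (t.foldl (stepB X Y) (x, y)).1 ≠ 0 := by rw [← hsx, ← hsy]; tauto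
          simp only [if_pos hc, if_pos hc', if_neg hne]; exact hidx
        · have hc' : ¬ ((t.foldl (stepB X Y) (x, y)).1 = (t.foldl (stepB X Y) (x, y)).2 + 1 ∧
              (t.foldl (stepB X Y) (x, y)).1 ≠ 0) := by rw [← hsx, ← hsy]; tauto
          simp only [if_neg hc, if_neg hc']
          have e1 : (t.foldl (stepB X Y) (x, y)).2 + 1 - 1 = (t.foldl (stepB X Y) (x, y)).2 := by ring
          rw [e1, ← ih i r x y hi, h]
      · simp only [if_neg hY]
        by_cases hc : sx ≠ 0 ∧ sx = sy
        · have hc' : (t.foldl (stepB X Y) (x, y)).1 = (t.foldl (stepB X Y) (x, y)).2 ∧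
              (t.foldl (stepB X Y) (x, y)).1 ≠ 0 := by rw [← hsx, ← hsy]; tauto
          simp only [if_pos hc, if_pos hc', if_neg hne]; exact hidx
        · have hc' : ¬ ((t.foldl (stepB X Y) (x, y)).1 = (t.foldl (stepB X Y) (x, y)).2 ∧
              (t.foldl (stepB X Y) (x, y)).1 ≠ 0) := by rw [← hsx, ← hsy]; tauto
          simp only [if_neg hc, if_neg hc']
          rw [← ih i r x y hi, h]

-- ===== VERDICT (by name: the statement is the Claim_ definition above) =====
theorem solution_spec : Claim_equal_solution := by
  intro X Y A _
  unfold Spec_solution solution solution_alt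
  rw [main_lemma X Y A 0 (-1) 0 0 le_rfl]
  simp only [zero_add]
  split_ifs with h
  · rw [← h]
  · rfl
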